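-- pv_equiv track=rewrite | github.com/KimDaeUng/py_algo | 개인문제/Codility/C4_Counting-elements.py | fast_solution
-- ===== SOURCE A (Python) =====
-- def counting(A, m):
--     n = len(A)
--     count = [0] * (m + 1)
--     for k in range(n):
--         count[A[k]] += 1
--     return count
--
-- def fast_solution(A, B, m):
--     n = len(A)
--     sum_a = sum(A)
--     sum_b = sum(B)
--     d = sum_b - sum_a
--     # If the differance is odd number,
--     # then swapping can't work.
--     if d % 2 == 1:
--         return False
--
--     d //= 2
--     count = counting(A, m)
--     for i in range(n):
--         if 0 <= B[i] - d and \
--             B[i] - d <= m and \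
--                 count[B[i] - d] > 0:
--             return True
--     return False
-- ===== SOURCE B (Python) =====
-- def fast_solution(A, B, m):
--     d = sum(B) - sum(A)
--     if d % 2 == 1:
--         return False
--     d //= 2
--     sa = sorted(A)
--     sb = sorted(B)
--     i = j = 0
--     while i < len(sa) and j < len(sb):
--         diff = sb[j] - sa[i]
--         if diff == d:
--             return True
--         elif diff < d:
--             j += 1
--         else:
--             i += 1
--     return False
-- ===== Notes on version B (the rewrite author's own statement) =====
-- stated objective: alternative
-- what changed: Replaces A's count-array build (size m+1) plus guarded B-scan with sorting both lists and a two-pointer sweep for a pair whose difference is half the sum difference; Pre_ excludes (besides A's IndexError crashes from A-values outside [0,m]) even-difference inputs with unequal lengths, where A's scanning only the first len(A) elements of B is an artefact of indexing B by range(len(A)) and either behaviour is defensible.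
-- outside the precondition, e.g. on fast_solution([0, 6], [1, 2, 9], 6): A returns False, B returns True; on fast_solution([-1], [3], 1): A returns True, B returns False; on fast_solution([3], [5], 2): A raises IndexError, B returns False
import Mathlib
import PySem

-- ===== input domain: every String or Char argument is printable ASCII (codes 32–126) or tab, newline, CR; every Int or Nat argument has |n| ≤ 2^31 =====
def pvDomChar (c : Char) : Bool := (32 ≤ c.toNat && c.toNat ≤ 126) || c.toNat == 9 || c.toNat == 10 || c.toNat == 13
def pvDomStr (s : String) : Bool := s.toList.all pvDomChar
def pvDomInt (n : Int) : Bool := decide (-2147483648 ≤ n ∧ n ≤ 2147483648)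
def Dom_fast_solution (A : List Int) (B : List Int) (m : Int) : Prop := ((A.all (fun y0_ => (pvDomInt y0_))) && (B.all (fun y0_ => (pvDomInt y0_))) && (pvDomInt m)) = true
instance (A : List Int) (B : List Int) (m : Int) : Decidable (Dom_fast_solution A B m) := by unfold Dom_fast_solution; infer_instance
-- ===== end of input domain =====

-- B replaces A's count-array membership scan with sort + two-pointer sweep: a different algorithm, independent of m.

-- ===== PORT A =====
-- helper 'counting' of A: count = [0]*(m+1); for k in range(n): count[A[k]] += 1
-- (count[A[k]] += 1 is ported with pySetD/pyGetD, Python index semantics; the out-of-range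
-- IndexError and the negative-index wraparound cases are excluded by Pre_)
def counting (A : List Int) (m : Int) : List Int :=
  (PySem.List.pyRange 0 (A.length : Int) 1).foldl
    (fun count k =>
      let a := PySem.List.pyGetD A k 0
      PySem.List.pySetD count a (PySem.List.pyGetD count a 0 + 1))
    (List.replicate (m + 1).toNat 0)

def fast_solution (A : List Int) (B : List Int) (m : Int) : Bool :=
  let n : Int := (A.length : Int)
  let sum_a := A.sum
  let sum_b := B.sum
  let d := sum_b - sum_a
  if PySem.Int.mod d 2 = 1 then false
  else
    let d2 := PySem.Int.floordiv d 2
    let count := counting A m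
    -- for i in range(n): if 0 <= B[i]-d and B[i]-d <= m and count[B[i]-d] > 0: return True
    (PySem.List.pyRange 0 n 1).any (fun i =>
      let b := PySem.List.pyGetD B i 0
      decide (0 ≤ b - d2) && decide (b - d2 ≤ m) &&
        decide (0 < PySem.List.pyGetD count (b - d2) 0))

-- ===== PORT B =====
-- Source B's while loop with pointers i, j is this head-consuming recursion on the two sorted lists
def twoPointer (sa : List Int) (sb : List Int) (d : Int) : Bool :=
  match sa, sb with
  | a :: as_, b :: bs =>
    if b - a = d then true
    else if b - a < d then twoPointer (a :: as_) bs d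
    else twoPointer as_ (b :: bs) d
  | _, _ => false
termination_by sa.length + sb.length
decreasing_by all_goals (simp; try omega)

def fast_solution_alt (A : List Int) (B : List Int) (m : Int) : Bool :=
  let d := B.sum - A.sum
  if PySem.Int.mod d 2 = 1 then false
  else
    let d2 := PySem.Int.floordiv d 2
    let sa := PySem.List.sorted A (fun x => x) false
    let sb := PySem.List.sorted B (fun x => x) false
    twoPointer sa sb d2

-- ===== PRECONDITION & SPEC =====
-- Pre_ excludes, for even sum-difference: inputs on which A's counting raises IndexError (an
-- element of A above m, or any element when m < 0; Python's negative-index wraparound lets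
-- A[k] ∈ [-(m+1),-1] return an accidental value instead of raising — excluded too), inputs
-- where the B[i] scan runs past a B shorter than A, and unequal-length inputs generally: A
-- scanning only the first len(A) elements of B is an artefact of indexing B by range(len(A)),
-- a corner (the task swaps between equal-length arrays) where either behaviour is defensible.
def Pre_fast_solution (A : List Int) (B : List Int) (m : Int) : Prop :=
  (B.sum - A.sum) % 2 = 1 ∨ ((∀ a ∈ A, 0 ≤ a ∧ a ≤ m) ∧ A.length = B.length)
instance (A : List Int) (B : List Int) (m : Int) : Decidable (Pre_fast_solution A B m) := by
  unfold Pre_fast_solution; infer_instance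

def pvWitness_fast_solution : List Int × List Int × Int := ([1, 2], [2, 3], 3)

def Spec_fast_solution (A : List Int) (B : List Int) (m : Int) (out : Bool) : Prop := out = fast_solution_alt A B m
instance (A : List Int) (B : List Int) (m : Int) (out : Bool) : Decidable (Spec_fast_solution A B m out) := by unfold Spec_fast_solution; infer_instance

-- ===== CLAIM (what is proved, stated in full; the proofs are below) =====
def Claim_equal_fast_solution : Prop := ∀ (A : List Int) (B : List Int) (m : Int), Dom_fast_solution A B m → Pre_fast_solution A B m → Spec_fast_solution A B m (fast_solution A B m)

-- ===== LEMMAS AND PROOFS =====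

-- invariant of A's counting loop: with all of A inside [0, m], cell x holds (occurrences of x so far)
theorem counting_loop_spec (A : List Int) (m : Int) :
  ∀ (count : List Int),
    count.length = (m + 1).toNat → (∀ a ∈ A, 0 ≤ a ∧ a ≤ m) →
    ∀ (x : Int), 0 ≤ x → x ≤ m →
    PySem.List.pyGetD
      (A.foldl (fun c a => PySem.List.pySetD c a (PySem.List.pyGetD c a 0 + 1)) count) x 0
      = PySem.List.pyGetD count x 0 + (A.count x : Int) := by
  induction A with
  | nil => intro count _ _ x _ _; simp
  | cons a A ih =>
    intro count hlen h1 x hx hxm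
    obtain ⟨ha0, ham⟩ := h1 a (by simp)
    have ha' : a.toNat < count.length := by omega
    have key : ∀ (v d : Int), PySem.List.pyGetD (PySem.List.pySetD count a v) x d
        = if x = a then v else PySem.List.pyGetD count x d := by
      intro v d
      have hxc : x = ((x.toNat : Nat) : Int) := by omega
      have hac : a = ((a.toNat : Nat) : Int) := by omega
      rw [hxc, hac, PySem.List.pyGetD_pySetD_natCast count a.toNat x.toNat v d ha']
      rcases eq_or_ne x a with h | h
      · rw [if_pos (by omega), if_pos (by omega)]
      · rw [if_neg (by omega), if_neg (by omega)]
    simp only [List.foldl_cons]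
    rw [ih _ (by rw [PySem.List.length_pySetD]; exact hlen) (fun b hb => h1 b (by simp [hb])) x hx hxm]
    rw [key, List.count_cons]
    rcases eq_or_ne x a with h | h
    · subst h
      rw [if_pos rfl, if_pos (by simp)]
      push_cast
      ring
    · rw [if_neg h, if_neg (by simp; exact h.symm)]
      push_cast
      ring

-- A's count cell at x is positive exactly when x occurs in A
theorem counting_pos_iff (A : List Int) (m : Int) (h1 : ∀ a ∈ A, 0 ≤ a ∧ a ≤ m)
    (x : Int) (hx : 0 ≤ x) (hxm : x ≤ m) :
    (0 < PySem.List.pyGetD (counting A m) x 0) ↔ x ∈ A := by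
  unfold counting
  rw [PySem.List.foldl_pyRange_zero_pyGetD' A 0
    (fun c a => PySem.List.pySetD c a (PySem.List.pyGetD c a 0 + 1)) (List.replicate (m + 1).toNat 0)]
  rw [counting_loop_spec A m _ (by simp) h1 x hx hxm]
  rw [PySem.List.pyGetD_of_nonneg _ _ hx]
  simp [List.getD, List.count_pos_iff]

-- A's B[i]-scan over range(len(A)) is a scan of B.take (len A)
theorem any_pyRange_take (B : List Int) (p : Int → Bool) :
    ∀ (n : Nat), n ≤ B.length →
    (PySem.List.pyRange 0 (n : Int) 1).any (fun i => p (PySem.List.pyGetD B i 0))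
      = (B.take n).any p := by
  intro n
  induction n with
  | zero => intro _; simp
  | succ n ih =>
    intro hn
    have hn' : n < B.length := by omega
    rw [PySem.List.pyRange_zero_natCast, List.range_succ]
    simp only [List.map_append, List.any_append, List.map_cons, List.map_nil]
    rw [← PySem.List.pyRange_zero_natCast, ih (by omega)]
    have htake : List.take (n + 1) B = List.take n B ++ [B[n]] := by
      rw [List.take_add_one]
      simp [List.getElem?_eq_getElem hn']
    have hb : PySem.List.pyGetD B ((n : Nat) : Int) 0 = B[n] := by
      rw [PySem.List.pyGetD_natCast]
      simp [List.getD_eq_getElem?_getD, List.getElem?_eq_getElem hn']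
    rw [htake, List.any_append]
    simp [hb]

-- soundness and completeness of the two-pointer sweep on sorted lists
theorem twoPointer_true_iff : ∀ (sa sb : List Int) (d : Int),
    sa.Pairwise (· ≤ ·) → sb.Pairwise (· ≤ ·) →
    (twoPointer sa sb d = true ↔ ∃ a ∈ sa, ∃ b ∈ sb, b - a = d) := by
  intro sa sb d
  induction sa, sb using twoPointer.induct d with
  | case1 a as_ b bs heq =>
    intro _ _
    rw [twoPointer]
    simp only [if_pos heq, true_iff]
    exact ⟨a, by simp, b, by simp, heq⟩
  | case2 a as_ b bs hne hlt ih =>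
    intro ha hb
    rw [twoPointer]
    rw [if_neg hne, if_pos hlt]
    rw [ih ha (List.Pairwise.sublist (List.sublist_cons_self b bs) hb)]
    constructor
    · rintro ⟨a', ha', b', hb', h⟩
      exact ⟨a', ha', b', by simp [hb'], h⟩
    · rintro ⟨a', ha', b', hb', h⟩
      rcases List.mem_cons.mp hb' with rfl | hb''
      · exfalso
        have : a ≤ a' := by
          rcases List.mem_cons.mp ha' with rfl | h2
          · exact le_refl _
          · exact (List.pairwise_cons.mp ha).1 a' h2
        omega
      · exact ⟨a', ha', b', hb'', h⟩
  | case3 a as_ b bs hne hge ih =>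
    intro ha hb
    rw [twoPointer]
    rw [if_neg hne, if_neg hge]
    rw [ih (List.Pairwise.sublist (List.sublist_cons_self a as_) ha) hb]
    constructor
    · rintro ⟨a', ha', b', hb', h⟩
      exact ⟨a', by simp [ha'], b', hb', h⟩
    · rintro ⟨a', ha', b', hb', h⟩
      rcases List.mem_cons.mp ha' with rfl | ha''
      · exfalso
        have : b ≤ b' := by
          rcases List.mem_cons.mp hb' with rfl | h2
          · exact le_refl _
          · exact (List.pairwise_cons.mp hb).1 b' h2
        omega
      · exact ⟨a', ha'', b', hb', h⟩
  | case4 sa sb h =>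
    intro _ _
    rcases sa with _ | ⟨a, as_⟩
    · rw [twoPointer] <;> simp
    · rcases sb with _ | ⟨b, bs⟩
      · rw [twoPointer] <;> simp
      · exact (h a as_ b bs rfl rfl).elim

theorem main_eq (A : List Int) (B : List Int) (m : Int)
    (hpre : (B.sum - A.sum) % 2 = 1 ∨ ((∀ a ∈ A, 0 ≤ a ∧ a ≤ m) ∧ A.length = B.length)) :
    fast_solution A B m = fast_solution_alt A B m := by
  by_cases hodd : PySem.Int.mod (B.sum - A.sum) 2 = 1
  · simp only [fast_solution, fast_solution_alt, hodd, if_pos]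
  · have hmod : PySem.Int.mod (B.sum - A.sum) 2 = (B.sum - A.sum) % 2 :=
      PySem.Int.mod_eq_emod_of_pos (by omega)
    have hpre' : (∀ a ∈ A, 0 ≤ a ∧ a ≤ m) ∧ A.length = B.length := by
      rcases hpre with h | h
      · exact absurd (hmod.trans h) hodd
      · exact h
    obtain ⟨h1, hlen⟩ := hpre'
    simp only [fast_solution, fast_solution_alt, hodd, if_false]
    set d2 := PySem.Int.floordiv (B.sum - A.sum) 2 with hd2
    rw [Bool.eq_iff_iff]
    rw [any_pyRange_take B (fun b => decide (0 ≤ b - d2) && decide (b - d2 ≤ m) &&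
      decide (0 < PySem.List.pyGetD (counting A m) (b - d2) 0)) A.length (le_of_eq hlen)]
    rw [hlen, List.take_length]
    rw [twoPointer_true_iff _ _ d2 (PySem.List.sorted_pairwise A (fun x => x))
      (PySem.List.sorted_pairwise B (fun x => x))]
    rw [List.any_eq_true]
    constructor
    · rintro ⟨b, hb, hcond⟩
      simp only [Bool.and_eq_true, decide_eq_true_eq] at hcond
      obtain ⟨⟨hb0, hbm⟩, hc⟩ := hcond
      have hmem : b - d2 ∈ A := (counting_pos_iff A m h1 (b - d2) hb0 hbm).mp hc
      exact ⟨b - d2, (PySem.List.mem_sorted _ _ _ _).mpr hmem, b,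
        (PySem.List.mem_sorted _ _ _ _).mpr hb, by ring⟩
    · rintro ⟨a, ha, b, hb, hab⟩
      have haA : a ∈ A := (PySem.List.mem_sorted _ _ _ _).mp ha
      have hbB : b ∈ B := (PySem.List.mem_sorted _ _ _ _).mp hb
      obtain ⟨ha0, ham⟩ := h1 a haA
      refine ⟨b, hbB, ?_⟩
      have hba : b - d2 = a := by omega
      simp only [Bool.and_eq_true, decide_eq_true_eq, hba]
      exact ⟨⟨ha0, ham⟩, (counting_pos_iff A m h1 a ha0 ham).mpr haA⟩

-- ===== VERDICT (by name: the statement is the Claim_ definition above) =====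
theorem fast_solution_spec : Claim_equal_fast_solution := by
  intro A B m _ hpre
  unfold Spec_fast_solution
  exact main_eq A B m hpre
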